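-- pv_equiv track=rewrite | github.com/jeiros/advent-of-code-2017 | day_17/solution.py | apply_spinlock
-- ===== SOURCE A (Python) =====
-- def update_spinlock(numbers, pos, step, val_to_insert):
--     new_pos = (pos + step) % len(numbers)
--     numbers.insert(new_pos + 1, val_to_insert)
--     return numbers, numbers.index(val_to_insert)
--
-- def apply_spinlock(step, iterations):
--     nums = [0]
--     ins = 1
--     pos = 0
--     for _ in range(iterations):
--         nums, pos = update_spinlock(nums, pos, step, ins)
--         ins += 1
--     return nums
-- ===== SOURCE B (Python) =====
-- def apply_spinlock(step, iterations):
--     # chunked-list spinlock: the circular buffer is kept as a list of chunks,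
--     # insertion walks chunk sizes and splits oversized chunks (cap doubles as it grows)
--     chunks = [[0]]
--     pos = 0
--     total = 1
--     cap = 8
--     ins = 1
--     for _ in range(iterations):
--         k = (pos + step) % total + 1
--         pos = k
--         j = 0
--         r = k
--         while r > len(chunks[j]):
--             r -= len(chunks[j])
--             j += 1
--         c = chunks[j]
--         c.insert(r, ins)
--         if len(c) > cap:
--             h = len(c) // 2
--             chunks[j:j + 1] = [c[:h], c[h:]]
--         if len(chunks) > cap:
--             cap *= 2
--         total += 1
--         ins += 1
--     return [x for c in chunks for x in c]
-- ===== Notes on version B (the rewrite author's own statement) =====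
-- stated objective: faster
-- what changed: Replaces the flat list with repeated O(n) insert and a full O(n) .index scan per iteration by a chunked list (list of chunks with a doubling size cap): each insertion walks ~sqrt(n) chunk headers, inserts into one small chunk, splits it when oversized, and the new position is known arithmetically so the .index scan disappears; the final list is the flattened chunks.
import Mathlib
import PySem

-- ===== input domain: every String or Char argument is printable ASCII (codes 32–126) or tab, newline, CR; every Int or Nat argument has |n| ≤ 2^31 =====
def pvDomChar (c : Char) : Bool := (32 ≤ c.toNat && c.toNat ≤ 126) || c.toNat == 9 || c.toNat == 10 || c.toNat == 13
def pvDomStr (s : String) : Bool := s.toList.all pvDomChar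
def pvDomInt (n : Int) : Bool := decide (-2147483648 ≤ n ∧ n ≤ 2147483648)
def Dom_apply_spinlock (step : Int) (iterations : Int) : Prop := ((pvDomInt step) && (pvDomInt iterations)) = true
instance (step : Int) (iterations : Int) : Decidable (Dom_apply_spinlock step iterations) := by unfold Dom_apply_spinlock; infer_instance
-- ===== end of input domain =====

-- B replaces A's flat list (O(n) insert + O(n) .index per iteration) by a chunked list with
-- arithmetically known positions; measured asymptotically faster. A mutates no caller-visible data.


-- ===== PORT A =====
-- update_spinlock(numbers, pos, step, val_to_insert); numbers.index raises ValueError when absent —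
-- unreachable here (the value was just inserted); the `none` branch is a totality guard only.
def update_spinlock (numbers : List Int) (pos step val_to_insert : Int) :
    List Int × Int :=
  let new_pos := PySem.Int.mod (pos + step) (numbers.length : Int)
  let numbers := PySem.List.insert numbers (new_pos + 1) val_to_insert
  (numbers, match PySem.List.index? numbers val_to_insert with
            | some i => (i : Int)
            | none => 0)

def stepA (step : Int) (s : List Int × Int × Int) : List Int × Int × Int :=
  let nums := s.1
  let ins := s.2.1
  let pos := s.2.2
  let r := update_spinlock nums pos step ins
  (r.1, ins + 1, r.2)

def apply_spinlock (step : Int) (iterations : Int) : List Int :=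
  ((PySem.List.pyRange 0 iterations 1).foldl (fun s _ => stepA step s) ([0], 1, 0)).1

-- ===== PORT B =====
-- the `while r > len(chunks[j])` walk + splice of Source B as structural recursion over the chunk list
def insertChunks (r v cap : Int) : List (List Int) → List (List Int)
  | [] => []          -- unreachable: r never exceeds the total of the chunk lengths
  | c :: rest =>
    if r > (c.length : Int) then
      c :: insertChunks (r - (c.length : Int)) v cap rest
    else
      let c' := PySem.List.insert c r v
      if (c'.length : Int) > cap then
        let h := c'.length / 2
        c'.take h :: c'.drop h :: rest
      else
        c' :: rest

-- state: (chunks, pos, total, cap, ins)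
def stepB (step : Int) (s : List (List Int) × Int × Int × Int × Int) :
    List (List Int) × Int × Int × Int × Int :=
  let chunks := s.1
  let pos := s.2.1
  let total := s.2.2.1
  let cap := s.2.2.2.1
  let ins := s.2.2.2.2
  let k := PySem.Int.mod (pos + step) total + 1
  let chunks' := insertChunks k ins cap chunks
  let cap' := if (chunks'.length : Int) > cap then cap * 2 else cap
  (chunks', k, total + 1, cap', ins + 1)

def apply_spinlock_alt (step : Int) (iterations : Int) : List Int :=
  (((PySem.List.pyRange 0 iterations 1).foldl (fun s _ => stepB step s)
      ([[0]], 0, 1, 8, 1)).1).flatten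

-- ===== PRECONDITION & SPEC =====
def Spec_apply_spinlock (step : Int) (iterations : Int) (out : List Int) : Prop := out = apply_spinlock_alt step iterations
instance (step : Int) (iterations : Int) (out : List Int) : Decidable (Spec_apply_spinlock step iterations out) := by unfold Spec_apply_spinlock; infer_instance

-- ===== CLAIM (what is proved, stated in full; the proofs are below) =====
def Claim_equal_apply_spinlock : Prop := ∀ (step : Int) (iterations : Int), Dom_apply_spinlock step iterations → Spec_apply_spinlock step iterations (apply_spinlock step iterations)

-- ===== LEMMAS AND PROOFS =====

-- the coupling invariant between A's state (nums, ins, pos) and B's state (chunks, pos, total, cap, ins)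
def SpinInv (sA : List Int × Int × Int) (sB : List (List Int) × Int × Int × Int × Int) : Prop :=
  sA.1 = sB.1.flatten ∧ sA.2.2 = sB.2.1 ∧ sA.2.1 = sB.2.2.2.2 ∧
  sB.2.2.1 = (sA.1.length : Int) ∧ sA.1 ≠ [] ∧ (∀ x ∈ sA.1, x < sA.2.1)

theorem index?_take_append : ∀ (pre suf : List Int) (v : Int), v ∉ pre →
    PySem.List.index? (pre ++ v :: suf) v = some pre.length := by
  intro pre suf v h
  rw [PySem.List.index?_eq_some_iff]
  exact ⟨pre, suf, rfl, rfl, h⟩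

theorem flatten_insertChunks (v cap : Int) : ∀ (cs : List (List Int)) (r : Int),
    1 ≤ r → r ≤ (cs.flatten.length : Int) →
    (insertChunks r v cap cs).flatten =
      cs.flatten.take r.toNat ++ v :: cs.flatten.drop r.toNat := by
  intro cs
  induction cs with
  | nil =>
    intro r h1 h2; exfalso
    simp only [List.flatten_nil, List.length_nil, Int.natCast_zero] at h2; omega
  | cons c rest ih =>
    intro r h1 h2
    simp only [List.flatten_cons, List.length_append, Nat.cast_add] at h2 ⊢
    by_cases hgt : r > (c.length : Int)
    · rw [insertChunks, if_pos hgt, List.flatten_cons,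
        ih (r - (c.length : Int)) (by omega) (by omega)]
      have hle : c.length ≤ r.toNat := by omega
      rw [List.take_append, List.drop_append,
        List.take_of_length_le hle, List.drop_eq_nil_of_le hle]
      have hsub : r.toNat - c.length = (r - (c.length : Int)).toNat := by omega
      rw [← hsub, List.nil_append, List.append_assoc]
    · rw [insertChunks, if_neg hgt]
      have hr : ((r.toNat : Nat) : Int) = r := Int.toNat_of_nonneg (by omega)
      have hlen : r.toNat ≤ c.length := by omega
      have hins : PySem.List.insert c r v = c.take r.toNat ++ v :: c.drop r.toNat := by
        have h' := PySem.List.insert_natCast c r.toNat v hlen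
        rw [hr] at h'; exact h'
      have hflat : ∀ tail : List (List Int),
          (if (((PySem.List.insert c r v).length : Nat) : Int) > cap then
            (PySem.List.insert c r v).take ((PySem.List.insert c r v).length / 2) ::
              (PySem.List.insert c r v).drop ((PySem.List.insert c r v).length / 2) :: tail
          else PySem.List.insert c r v :: tail).flatten
          = PySem.List.insert c r v ++ tail.flatten := by
        intro tail; split_ifs <;>
          simp [← List.append_assoc, List.take_append_drop]
      show _ = _
      rw [hflat rest, hins, List.take_append_of_le_length hlen,
        List.drop_append_of_le_length hlen]
      simp

theorem step_Inv (step : Int) (sA : List Int × Int × Int)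
    (sB : List (List Int) × Int × Int × Int × Int) (h : SpinInv sA sB) :
    SpinInv (stepA step sA) (stepB step sB) := by
  obtain ⟨h1, h2, h3, h4, h5, h6⟩ := h
  have hlenpos : 0 < sA.1.length := List.length_pos_iff.mpr h5
  set k : Int := PySem.Int.mod (sA.2.2 + step) (sA.1.length : Int) + 1 with hk
  have hk1 : 1 ≤ k := by
    have := PySem.Int.mod_nonneg (sA.2.2 + step) (b := (sA.1.length : Int)) (by exact_mod_cast hlenpos)
    omega
  have hk2 : k ≤ (sA.1.length : Int) := by
    have := PySem.Int.mod_lt (sA.2.2 + step) (b := (sA.1.length : Int)) (by exact_mod_cast hlenpos)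
    omega
  have hkn : k.toNat ≤ sA.1.length := by omega
  have hkcast : ((k.toNat : Nat) : Int) = k := Int.toNat_of_nonneg (by omega)
  have hkB : PySem.Int.mod (sB.2.1 + step) sB.2.2.1 + 1 = k := by rw [← h2, h4]
  have hins : PySem.List.insert sA.1 k sA.2.1 =
      sA.1.take k.toNat ++ sA.2.1 :: sA.1.drop k.toNat := by
    have h' := PySem.List.insert_natCast sA.1 k.toNat sA.2.1 hkn
    rw [hkcast] at h'; exact h'
  have hnotmem : sA.2.1 ∉ sA.1.take k.toNat := fun hmem =>
    absurd rfl (Int.ne_of_lt (h6 _ (List.mem_of_mem_take hmem)))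
  have hidx : PySem.List.index? (PySem.List.insert sA.1 k sA.2.1) sA.2.1
      = some (sA.1.take k.toNat).length := by
    rw [hins]; exact index?_take_append _ _ _ hnotmem
  have hAnums : (stepA step sA).1 = sA.1.take k.toNat ++ sA.2.1 :: sA.1.drop k.toNat := by
    simp only [stepA, update_spinlock]
    rw [← hk, hins]
  have hApos : (stepA step sA).2.2 = k := by
    simp only [stepA, update_spinlock]
    rw [← hk, hidx]
    rw [List.length_take, Nat.min_eq_left hkn]
    exact hkcast
  have hAlen : ((stepA step sA).1).length = sA.1.length + 1 := by
    rw [hAnums]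
    simp only [List.length_append, List.length_take, List.length_cons, List.length_drop]
    omega
  have hBflat : (stepB step sB).1.flatten =
      sA.1.take k.toNat ++ sA.2.1 :: sA.1.drop k.toNat := by
    simp only [stepB]
    rw [hkB, ← h3]
    rw [flatten_insertChunks _ _ _ _ hk1 (by rw [← h1]; exact hk2)]
    rw [← h1]
  refine ⟨?_, ?_, ?_, ?_, ?_, ?_⟩
  · rw [hAnums, hBflat]
  · rw [hApos]; simp only [stepB]; exact hkB.symm
  · simp [stepA, stepB, h3]
  · show (stepB step sB).2.2.1 = _
    simp only [stepB]
    rw [hAlen, h4]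
    push_cast; ring
  · rw [hAnums]; simp
  · intro x hx
    rw [hAnums] at hx
    have hins' : (stepA step sA).2.1 = sA.2.1 + 1 := by simp [stepA]
    rw [hins']
    rcases List.mem_append.mp hx with hx | hx
    · exact lt_trans (h6 _ (List.mem_of_mem_take hx)) (by omega)
    · rcases List.mem_cons.mp hx with rfl | hx
      · omega
      · exact lt_trans (h6 _ (List.mem_of_mem_drop hx)) (by omega)

theorem foldl_Inv (step : Int) : ∀ (l : List Int) (sA : List Int × Int × Int)
    (sB : List (List Int) × Int × Int × Int × Int), SpinInv sA sB →
    SpinInv (l.foldl (fun s _ => stepA step s) sA) (l.foldl (fun s _ => stepB step s) sB) := by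
  intro l
  induction l with
  | nil => intro sA sB h; exact h
  | cons x xs ih => intro sA sB h; exact ih _ _ (step_Inv step sA sB h)

-- ===== VERDICT (by name: the statement is the Claim_ definition above) =====
theorem apply_spinlock_spec : Claim_equal_apply_spinlock := by
  intro step iterations _
  show apply_spinlock step iterations = apply_spinlock_alt step iterations
  have h0 : SpinInv ([0], 1, 0) ([[0]], 0, 1, 8, 1) := by
    refine ⟨rfl, rfl, rfl, rfl, by simp, ?_⟩
    intro x hx; simp at hx; subst hx; decide
  exact (foldl_Inv step (PySem.List.pyRange 0 iterations 1) _ _ h0).1
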